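-- pv_equiv track=rewrite | github.com/petedprice/EQ | 16.get-longest-isoforms-StringTie.py | find_isoforms
-- ===== SOURCE A (Python) =====
-- def find_isoforms(genome):
--     ''' Reads dictionary and outputs another dictionary
--     key [gene name] values [isoform name, length of isoform]
--     '''
--     isoforms = {}
--     for seq in genome:
--         gname = genome[seq][1].split(".")[0]+"."+genome[seq][1].split(".")[1]
--         if gname not in isoforms:
--             isoforms[gname] = [(seq, len(genome[seq][0]))]
--         else:
--             isoforms[gname].append((seq, len(genome[seq][0])))
--     return isoforms
-- ===== SOURCE B (Python) =====
-- def find_isoforms(genome):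
--     ''' Same result as A: group isoforms by gene name, built as
--     flat tuples -> ordered key dedup -> one comprehension per key. '''
--     pairs = [(genome[s][1].split(".")[0] + "." + genome[s][1].split(".")[1],
--               s, len(genome[s][0])) for s in genome]
--     keys = list(dict.fromkeys(g for g, _, _ in pairs))
--     return {k: [(s, l) for g, s, l in pairs if g == k] for k in keys}
-- ===== Notes on version B (the rewrite author's own statement) =====
-- stated objective: alternative
-- what changed: Replaces A's single-pass dict accumulation (insert-or-append per entry) with a flat list of (gene, isoform, length) tuples, an ordered key dedup, and one per-key filtering comprehension building each group.
import Mathlib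
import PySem

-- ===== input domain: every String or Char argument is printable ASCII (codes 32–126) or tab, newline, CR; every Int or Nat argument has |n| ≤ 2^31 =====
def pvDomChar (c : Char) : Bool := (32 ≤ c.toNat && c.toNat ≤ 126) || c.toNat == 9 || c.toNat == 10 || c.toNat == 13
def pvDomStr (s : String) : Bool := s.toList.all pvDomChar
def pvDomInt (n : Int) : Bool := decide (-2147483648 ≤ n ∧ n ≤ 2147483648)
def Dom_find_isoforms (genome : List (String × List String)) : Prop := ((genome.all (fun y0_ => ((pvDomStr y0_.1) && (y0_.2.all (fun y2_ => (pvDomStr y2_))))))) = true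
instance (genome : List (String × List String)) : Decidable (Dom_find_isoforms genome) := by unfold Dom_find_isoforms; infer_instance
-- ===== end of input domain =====

-- B groups isoforms by gene via a flat tuple list + ordered key dedup + one per-key
-- filtering pass, instead of A's single-pass dict insert-or-append accumulation
-- (objective: alternative decomposition, no speed claim).

-- ===== PORT A =====
-- gname = genome[seq][1].split(".")[0] + "." + genome[seq][1].split(".")[1]
def gnameA (v : List String) : String :=
  PySem.List.pyGetD ((PySem.Str.split? (PySem.List.pyGetD v 1 "") ".").getD []) 0 ""
    ++ "." ++ PySem.List.pyGetD ((PySem.Str.split? (PySem.List.pyGetD v 1 "") ".").getD []) 1 ""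

-- 'for seq in genome' iterates the dict's keys; genome[seq] is its value:
-- fold over (Dict.ofList genome).items, building the isoforms dict entry by entry.
def find_isoforms (genome : List (String × List String)) : List (String × List (String × Int)) :=
  ((PySem.Dict.ofList genome).items.foldl (fun isoforms p =>
      if isoforms.contains (gnameA p.2) = false then
        isoforms.insert (gnameA p.2) [(p.1, PySem.Str.len (PySem.List.pyGetD p.2 0 ""))]
      else
        isoforms.modify (gnameA p.2) [] (· ++ [(p.1, PySem.Str.len (PySem.List.pyGetD p.2 0 ""))])
    ) PySem.Dict.empty).items

-- ===== PORT B =====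
-- the same split expression, recomputed per entry exactly as in Source B
def gnameB (v : List String) : String :=
  PySem.List.pyGetD ((PySem.Str.split? (PySem.List.pyGetD v 1 "") ".").getD []) 0 ""
    ++ "." ++ PySem.List.pyGetD ((PySem.Str.split? (PySem.List.pyGetD v 1 "") ".").getD []) 1 ""

-- the flat tuple list 'pairs' of Source B: (gene name, (isoform name, length))
def pairsB (genome : List (String × List String)) : List (String × (String × Int)) :=
  (PySem.Dict.ofList genome).items.map
    (fun p => (gnameB p.2, (p.1, PySem.Str.len (PySem.List.pyGetD p.2 0 ""))))

def find_isoforms_alt (genome : List (String × List String)) : List (String × List (String × Int)) :=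
  (PySem.List.dedup ((pairsB genome).map (·.1))).map
    (fun k => (k, ((pairsB genome).filter (fun q => q.1 == k)).map (·.2)))

-- ===== PRECONDITION & SPEC =====
-- Pre_ excludes exactly the inputs on which Python A raises IndexError: a dict entry
-- whose value has fewer than two fields, or whose second field contains no dot
-- (then the second split part does not exist). Stated over the dict's entries (ofList = the
-- dict Python builds, so duplicate keys count only through their surviving value).
def Pre_find_isoforms (genome : List (String × List String)) : Prop :=
  ∀ p ∈ (PySem.Dict.ofList genome).items,
    2 ≤ p.2.length ∧ '.' ∈ (PySem.List.pyGetD p.2 1 "").toList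
instance (genome : List (String × List String)) : Decidable (Pre_find_isoforms genome) := by
  unfold Pre_find_isoforms; infer_instance

def pvWitness_find_isoforms : (List (String × List String)) := [("iso1", ["ATG", "gene.1.iso"])]

def Spec_find_isoforms (genome : List (String × List String)) (out : List (String × List (String × Int))) : Prop := out = find_isoforms_alt genome
instance (genome : List (String × List String)) (out : List (String × List (String × Int))) : Decidable (Spec_find_isoforms genome out) := by unfold Spec_find_isoforms; infer_instance

-- ===== CLAIM (what is proved, stated in full; the proofs are below) =====
def Claim_equal_find_isoforms : Prop := ∀ (genome : List (String × List String)), Dom_find_isoforms genome → Pre_find_isoforms genome → Spec_find_isoforms genome (find_isoforms genome)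

-- ===== LEMMAS AND PROOFS =====

-- A's two branches are one dict-modify step.
theorem step_eq_modify (d : PySem.Dict String (List (String × Int))) (k : String)
    (e : String × Int) :
    (if d.contains k = false then d.insert k [e] else d.modify k [] (· ++ [e]))
      = d.modify k [] (· ++ [e]) := by
  by_cases h : d.contains k = false
  · simp [h, PySem.Dict.modify, PySem.Dict.getD_of_not_contains d [] h]
  · simp [h]

-- the grouping fold, characterised: items of the accumulated dict = B's per-key scans
theorem fold_modify_items (l : List (String × (String × Int))) :
    (l.foldl (fun d q => d.modify q.1 [] (· ++ [q.2])) PySem.Dict.empty).items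
      = (PySem.List.dedup (l.map (·.1))).map
          (fun k => (k, (l.filter (fun q => q.1 == k)).map (·.2))) := by
  have hnd : (l.foldl (fun d q => d.modify q.1 [] (· ++ [q.2])) PySem.Dict.empty).keys.Nodup :=
    PySem.Dict.nodup_keys_foldl_modify_key l (·.1) [] (fun _ q => (· ++ [q.2]))
      PySem.Dict.empty (by simp)
  have hkeys : (l.foldl (fun d q => d.modify q.1 [] (· ++ [q.2])) PySem.Dict.empty).keys
      = PySem.List.dedup (l.map (·.1)) := by
    rw [PySem.Dict.keys_foldl_modify_key]
    simp [PySem.List.dedup_eq_ofList, PySem.Set.update,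
      PySem.Set.ofList]
  rw [PySem.Dict.items_eq_map_keys _ hnd [], hkeys]
  refine List.map_congr_left (fun k _ => ?_)
  rw [PySem.Dict.getD_foldl_modify_append, PySem.Dict.getD_empty]
  simp

-- ===== VERDICT (by name: the statement is the Claim_ definition above) =====
theorem find_isoforms_spec : Claim_equal_find_isoforms := by
  intro genome _ _
  unfold Spec_find_isoforms find_isoforms find_isoforms_alt pairsB
  have hg : gnameB = gnameA := rfl
  rw [hg]
  have h1 : ((PySem.Dict.ofList genome).items.foldl (fun isoforms p =>
      if isoforms.contains (gnameA p.2) = false then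
        isoforms.insert (gnameA p.2) [(p.1, PySem.Str.len (PySem.List.pyGetD p.2 0 ""))]
      else
        isoforms.modify (gnameA p.2) [] (· ++ [(p.1, PySem.Str.len (PySem.List.pyGetD p.2 0 ""))]))
      PySem.Dict.empty)
      = ((PySem.Dict.ofList genome).items.foldl
        (fun d p => d.modify (gnameA p.2) []
          (· ++ [(p.1, PySem.Str.len (PySem.List.pyGetD p.2 0 ""))])) PySem.Dict.empty) :=
    by apply PySem.List.foldl_congr_mem; intro acc x hx; exact step_eq_modify acc (gnameA x.2) _
  rw [h1, show ((PySem.Dict.ofList genome).items.foldl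
        (fun d p => d.modify (gnameA p.2) []
          (· ++ [(p.1, PySem.Str.len (PySem.List.pyGetD p.2 0 ""))])) PySem.Dict.empty)
      = (((PySem.Dict.ofList genome).items.map
          (fun p => (gnameA p.2, (p.1, PySem.Str.len (PySem.List.pyGetD p.2 0 ""))))).foldl
          (fun d q => d.modify q.1 [] (· ++ [q.2])) PySem.Dict.empty) from
    (List.foldl_map
      (f := fun (p : String × List String) => (gnameA p.2, (p.1, PySem.Str.len (PySem.List.pyGetD p.2 0 ""))))
      (g := fun (d : PySem.Dict String (List (String × Int))) (q : String × (String × Int)) => d.modify q.1 [] (· ++ [q.2]))).symm]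
  exact fold_modify_items _
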